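-- pv_equiv track=rewrite | github.com/kylemaps/neurodeskedu | tools/generate_reviews_registry.py | _infer_state
-- ===== SOURCE A (Python) =====
-- from typing import Any, Dict, List, Optional, Tuple
--
-- STATE_PRECEDENCE = ["stale", "reviewed", "in-progress", "queued", "unreviewed"]
--
-- LABEL_TO_STATE: Dict[str, str] = {
--     "reviewed": "reviewed",
--     "review:accepted": "reviewed",
--     "review:in-progress": "in-progress",
--     "review:in progress": "in-progress",
--     "review:queued": "queued",
--     "review:stale": "stale",
-- }
--
-- def _infer_state(labels: List[str]) -> str:
--     mapped = set()
--     for label in labels: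
--         s = LABEL_TO_STATE.get(label.strip().lower())
--         if s:
--             mapped.add(s)
--     for state in STATE_PRECEDENCE:
--         if state in mapped:
--             return state
--     return "unreviewed"
-- ===== SOURCE B (Python) =====
-- from typing import Dict, List
--
-- STATE_PRECEDENCE = ["stale", "reviewed", "in-progress", "queued", "unreviewed"]
--
-- LABEL_TO_STATE: Dict[str, str] = {
--     "reviewed": "reviewed",
--     "review:accepted": "reviewed",
--     "review:in-progress": "in-progress",
--     "review:in progress": "in-progress",
--     "review:queued": "queued",
--     "review:stale": "stale",
-- }
--
-- _RANK: Dict[str, int] = {s: i for i, s in enumerate(STATE_PRECEDENCE)}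
--
-- def _infer_state(labels: List[str]) -> str:
--     # single pass: keep the best (lowest-rank) state seen so far
--     best = None  # (rank, state) or None
--     for label in labels:
--         s = LABEL_TO_STATE.get(label.strip().lower())
--         if s:
--             r = _RANK[s]
--             if best is None or r < best[0]:
--                 best = (r, s)
--     return best[1] if best is not None else "unreviewed"
-- ===== Notes on version B (the rewrite author's own statement) =====
-- stated objective: simpler
-- what changed: A builds a set of all mapped states and then scans the precedence list for the first member; B makes a single pass over the labels keeping only the best (lowest-rank) state seen so far and returns it directly, dropping the set and the second scan.
import Mathlib
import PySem

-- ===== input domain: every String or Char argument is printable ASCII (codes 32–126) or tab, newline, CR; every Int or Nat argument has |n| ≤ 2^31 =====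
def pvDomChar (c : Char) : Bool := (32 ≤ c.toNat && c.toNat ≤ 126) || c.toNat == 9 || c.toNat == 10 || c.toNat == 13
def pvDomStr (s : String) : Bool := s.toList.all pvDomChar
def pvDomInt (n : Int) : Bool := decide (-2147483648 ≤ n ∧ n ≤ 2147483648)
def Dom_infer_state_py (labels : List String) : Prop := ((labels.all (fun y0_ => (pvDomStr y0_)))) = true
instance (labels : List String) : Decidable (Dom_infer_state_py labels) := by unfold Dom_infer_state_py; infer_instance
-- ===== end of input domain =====

-- B replaces A's two-phase "collect mapped states into a set, then scan the precedence list"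
-- by a single pass keeping the best (lowest-rank) state seen so far (objective: simpler).

-- ===== PORT A =====
def pvStatePrec : List String := ["stale", "reviewed", "in-progress", "queued", "unreviewed"]

def pvLabelToState : PySem.Dict String String := PySem.Dict.ofList
  [("reviewed", "reviewed"), ("review:accepted", "reviewed"),
   ("review:in-progress", "in-progress"), ("review:in progress", "in-progress"),
   ("review:queued", "queued"), ("review:stale", "stale")]

-- one iteration of A's first loop: s = LABEL_TO_STATE.get(label.strip().lower()); if s: mapped.add(s)
def pvStepA (m : PySem.Set String) (label : String) : PySem.Set String :=
  match PySem.Dict.get? pvLabelToState (PySem.Str.lower (PySem.Str.strip label)) with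
  | some s => if s ≠ "" then PySem.Set.add m s else m
  | none => m

-- A's second loop with its early return
def pvScanPrec (m : PySem.Set String) : List String → String
  | [] => "unreviewed"
  | st :: rest => if PySem.Set.contains m st then st else pvScanPrec m rest

def infer_state_py (labels : List String) : String :=
  pvScanPrec (labels.foldl pvStepA PySem.Set.empty) pvStatePrec

-- ===== PORT B =====
-- _RANK = {s: i for i, s in enumerate(STATE_PRECEDENCE)}
def pvRank : PySem.Dict String Int :=
  PySem.Dict.ofList ((PySem.List.enumerate pvStatePrec).map (fun p => (p.2, (p.1 : Int))))

-- one iteration of B's loop over labels, carrying best = None | (rank, state)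
def pvStepB (best : Option (Int × String)) (label : String) : Option (Int × String) :=
  match PySem.Dict.get? pvLabelToState (PySem.Str.lower (PySem.Str.strip label)) with
  | some s =>
    if s ≠ "" then
      -- _RANK[s]: s is always a key of _RANK here, so the KeyError branch is unreachable
      let r := (PySem.Dict.get? pvRank s).getD 0
      match best with
      | none => some (r, s)
      | some b => if r < b.1 then some (r, s) else best
    else best
  | none => best

def infer_state_py_alt (labels : List String) : String :=
  match labels.foldl pvStepB none with
  | some b => b.2
  | none => "unreviewed"

-- ===== PRECONDITION & SPEC =====
def Spec_infer_state_py (labels : List String) (out : String) : Prop := out = infer_state_py_alt labels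
instance (labels : List String) (out : String) : Decidable (Spec_infer_state_py labels out) := by unfold Spec_infer_state_py; infer_instance

-- ===== CLAIM (what is proved, stated in full; the proofs are below) =====
def Claim_equal_infer_state_py : Prop := ∀ (labels : List String), Dom_infer_state_py labels → Spec_infer_state_py labels (infer_state_py labels)

-- ===== LEMMAS AND PROOFS =====

-- invariant tying A's set of mapped states to B's best (rank, state)
def pvInv (m : PySem.Set String) (best : Option (Int × String)) : Prop :=
  (best = none → ∀ (j : Nat) (s : String), pvStatePrec[j]? = some s → s ∉ m) ∧
  (∀ (r : Int) (bs : String), best = some (r, bs) →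
    ∃ k : Nat, r = (k : Int) ∧ pvStatePrec[k]? = some bs ∧ bs ∈ m ∧
      ∀ (j : Nat), j < k → ∀ (s : String), pvStatePrec[j]? = some s → s ∉ m)

lemma pvVal (k s : String) (h : PySem.Dict.get? pvLabelToState k = some s) :
    s = "reviewed" ∨ s = "in-progress" ∨ s = "queued" ∨ s = "stale" := by
  have hd : pvLabelToState = PySem.Dict.mk
      [("reviewed", "reviewed"), ("review:accepted", "reviewed"),
       ("review:in-progress", "in-progress"), ("review:in progress", "in-progress"),
       ("review:queued", "queued"), ("review:stale", "stale")] := by decide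
  rw [hd] at h
  simp only [PySem.Dict.get?_mk_cons] at h
  split_ifs at h <;> simp_all [PySem.Dict.get?]

-- distinct positions of the (duplicate-free) precedence list hold distinct states
lemma pvNe (j k : Nat) (t s : String) (hj : pvStatePrec[j]? = some t)
    (hk : pvStatePrec[k]? = some s) (hne : j ≠ k) : t ≠ s := by
  rintro rfl
  obtain ⟨hjl, -⟩ := List.getElem?_eq_some_iff.mp hj
  exact hne (List.getElem?_inj hjl (by decide) (hj.trans hk.symm))

lemma pvScan_none (l : List String) (m : PySem.Set String)
    (h : ∀ (j : Nat) (s : String), l[j]? = some s → s ∉ m) : pvScanPrec m l = "unreviewed" := by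
  induction l with
  | nil => rfl
  | cons st rest ih =>
    have h0 : st ∉ m := h 0 st (by simp)
    have hc : PySem.Set.contains m st = false := by simpa [PySem.Set.contains] using h0
    simp only [pvScanPrec, hc, Bool.false_eq_true, if_false]
    exact ih (fun j s hj => h (j + 1) s (by simpa using hj))

lemma pvScan_some (l : List String) (m : PySem.Set String) (k : Nat) (bs : String)
    (hk : l[k]? = some bs) (hm : bs ∈ m)
    (h : ∀ (j : Nat), j < k → ∀ (s : String), l[j]? = some s → s ∉ m) : pvScanPrec m l = bs := by
  induction l generalizing k with
  | nil => simp at hk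
  | cons st rest ih =>
    cases k with
    | zero =>
      simp only [List.getElem?_cons_zero, Option.some.injEq] at hk
      subst hk
      simp [pvScanPrec, PySem.Set.contains, hm]
    | succ k' =>
      have h0 : st ∉ m := h 0 (Nat.succ_pos _) st (by simp)
      have hc : PySem.Set.contains m st = false := by simpa [PySem.Set.contains] using h0
      simp only [pvScanPrec, hc, Bool.false_eq_true, if_false]
      exact ih k' (by simpa using hk) (fun j hj s hs => h (j + 1) (by omega) s (by simpa using hs))

-- B's best-update, named so the step lemma can be stated without a dependent match
def pvUpd (best : Option (Int × String)) (k : Nat) (s : String) : Option (Int × String) :=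
  match best with
  | none => some ((k : Int), s)
  | some b => if (k : Int) < b.1 then some ((k : Int), s) else best

lemma pvStep_add (m : PySem.Set String) (best : Option (Int × String)) (s : String) (k : Nat)
    (hk : pvStatePrec[k]? = some s) (hinv : pvInv m best) :
    pvInv (PySem.Set.add m s) (pvUpd best k s) := by
  obtain ⟨hn, hs⟩ := hinv
  cases best with
  | none =>
    unfold pvUpd pvInv
    refine ⟨fun hx => by simp at hx, fun r bs hb => ?_⟩
    simp only [Option.some.injEq, Prod.mk.injEq] at hb
    obtain ⟨rfl, rfl⟩ := hb
    refine ⟨k, rfl, hk, by simp [PySem.Set.mem_add _ _ _], fun j hj t ht hmem => ?_⟩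
    rcases (PySem.Set.mem_add _ _ _).mp hmem with h1 | h1
    · exact hn rfl j t ht h1
    · exact pvNe j k t s ht hk (Nat.ne_of_lt hj) h1
  | some b =>
    obtain ⟨br, bs⟩ := b
    obtain ⟨k0, rfl, hk0, hbm, hblt⟩ := hs br bs rfl
    by_cases hlt : ((k : Nat) : Int) < ((k0 : Nat) : Int)
    · have hkk : k < k0 := by exact_mod_cast hlt
      unfold pvUpd pvInv
      simp only [hlt, if_true]
      refine ⟨fun hx => by simp at hx, fun r bs' hb => ?_⟩
      simp only [Option.some.injEq, Prod.mk.injEq] at hb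
      obtain ⟨rfl, rfl⟩ := hb
      refine ⟨k, rfl, hk, by simp [PySem.Set.mem_add _ _ _], fun j hj t ht hmem => ?_⟩
      rcases (PySem.Set.mem_add _ _ _).mp hmem with h1 | h1
      · exact hblt j (Nat.lt_trans hj hkk) t ht h1
      · exact pvNe j k t s ht hk (Nat.ne_of_lt hj) h1
    · have hkk : k0 ≤ k := by omega
      unfold pvUpd pvInv
      simp only [hlt, if_false]
      refine ⟨fun hx => by simp at hx, fun r bs' hb => ?_⟩
      simp only [Option.some.injEq, Prod.mk.injEq] at hb
      obtain ⟨rfl, rfl⟩ := hb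
      refine ⟨k0, rfl, hk0, by simp [PySem.Set.mem_add _ _ _, hbm], fun j hj t ht hmem => ?_⟩
      rcases (PySem.Set.mem_add _ _ _).mp hmem with h1 | h1
      · exact hblt j hj t ht h1
      · exact pvNe j k t s ht hk (by omega) h1

lemma pvStep_inv (m : PySem.Set String) (best : Option (Int × String)) (label : String)
    (hinv : pvInv m best) : pvInv (pvStepA m label) (pvStepB best label) := by
  unfold pvStepA pvStepB
  cases hget : PySem.Dict.get? pvLabelToState (PySem.Str.lower (PySem.Str.strip label)) with
  | none => exact hinv
  | some s =>
    rcases pvVal _ s hget with rfl | rfl | rfl | rfl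
    · have hr : (PySem.Dict.get? pvRank "reviewed").getD 0 = ((1 : Nat) : Int) := by decide
      have hc : ¬("reviewed" : String) = "" := by decide
      simp only [ne_eq, if_pos hc, hr]
      exact pvStep_add m best "reviewed" 1 (by decide) hinv
    · have hr : (PySem.Dict.get? pvRank "in-progress").getD 0 = ((2 : Nat) : Int) := by decide
      have hc : ¬("in-progress" : String) = "" := by decide
      simp only [ne_eq, if_pos hc, hr]
      exact pvStep_add m best "in-progress" 2 (by decide) hinv
    · have hr : (PySem.Dict.get? pvRank "queued").getD 0 = ((3 : Nat) : Int) := by decide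
      have hc : ¬("queued" : String) = "" := by decide
      simp only [ne_eq, if_pos hc, hr]
      exact pvStep_add m best "queued" 3 (by decide) hinv
    · have hr : (PySem.Dict.get? pvRank "stale").getD 0 = ((0 : Nat) : Int) := by decide
      have hc : ¬("stale" : String) = "" := by decide
      simp only [ne_eq, if_pos hc, hr]
      exact pvStep_add m best "stale" 0 (by decide) hinv

lemma pvLoop_inv (labels : List String) (m : PySem.Set String) (best : Option (Int × String))
    (hinv : pvInv m best) : pvInv (labels.foldl pvStepA m) (labels.foldl pvStepB best) := by
  induction labels generalizing m best with
  | nil => exact hinv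
  | cons l ls ih =>
    rw [List.foldl_cons, List.foldl_cons]
    exact ih _ _ (pvStep_inv m best l hinv)

-- ===== VERDICT (by name: the statement is the Claim_ definition above) =====
theorem infer_state_py_spec : Claim_equal_infer_state_py := by
  intro labels _
  unfold Spec_infer_state_py infer_state_py infer_state_py_alt
  have h := pvLoop_inv labels PySem.Set.empty none (by
    constructor
    · intro _ j s _ h; cases h
    · intro r bs h; exact absurd h (by simp))
  cases hb : labels.foldl pvStepB none with
  | none =>
    rw [hb] at h
    exact pvScan_none _ _ (h.1 rfl)
  | some b =>
    obtain ⟨r, bs⟩ := b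
    rw [hb] at h
    obtain ⟨k, -, hk, hm, hlt⟩ := h.2 r bs rfl
    exact pvScan_some _ _ k bs hk hm hlt
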